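-- pv_equiv track=rewrite | github.com/pc5401/my_BOJ | 백준/Bronze/1333. 부재중 전화/부재중 전화.py | solve
-- ===== SOURCE A (Python) =====
-- def solve(N, L, D):
--     total_album_time = N*L + (N-1)*5
--
--     bell_time = 0
--     while bell_time <= total_album_time:
--         if bell_time % (L+5) < L:
--             bell_time += D
--         else:
--             break
--
--     if bell_time <= total_album_time:
--         return bell_time
--     else:
--         return total_album_time + D - (total_album_time % D)
-- ===== SOURCE B (Python) =====
-- def solve(N, L, D):
--     total = N * L + (N - 1) * 5
--     period = L + 5
--     for i in range(1, N + 1):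
--         start = i * period - 5
--         cand = ((start + D - 1) // D) * D
--         if cand < start + 5 and cand <= total:
--             return cand
--     return total + D - total % D
-- ===== Notes on version B (the rewrite author's own statement) =====
-- stated objective: alternative
-- what changed: Replaces A's bell-by-bell scan over successive multiples of D with a direct per-break-window computation: for each of the N break windows it computes the smallest multiple of D at or after the window start by ceiling division and returns the first one that fits, so no multiple-by-multiple stepping remains.
-- outside the precondition, e.g. on solve(2, -3, 2): A returns 0, B returns -2; on solve(1, 1, 0): A does not finish within the time limit, B raises ZeroDivisionError
import Mathlib
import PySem

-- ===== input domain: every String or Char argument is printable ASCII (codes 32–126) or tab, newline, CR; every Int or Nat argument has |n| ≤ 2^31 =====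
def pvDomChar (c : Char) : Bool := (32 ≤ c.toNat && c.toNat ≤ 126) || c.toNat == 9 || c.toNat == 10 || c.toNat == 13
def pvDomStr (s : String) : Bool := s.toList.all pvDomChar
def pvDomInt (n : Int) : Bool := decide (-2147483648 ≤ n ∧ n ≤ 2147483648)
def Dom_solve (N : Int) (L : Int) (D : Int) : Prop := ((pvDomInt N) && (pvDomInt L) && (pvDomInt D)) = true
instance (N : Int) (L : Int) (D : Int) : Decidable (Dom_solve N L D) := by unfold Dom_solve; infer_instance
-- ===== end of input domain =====

-- B replaces A's bell-by-bell scan over multiples of D with a per-break-window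
-- ceiling-division computation (alternative decomposition, same results on Pre_).

-- ===== PORT A =====
-- A's while loop; the fuel (T+1).toNat only bounds the iteration count (under Pre_ the
-- loop stops no later than that), it changes no computed value
def solveLoop (L P T D : Int) : Nat → Int → Int
  | 0, bell => bell
  | f+1, bell =>
    if bell ≤ T then
      if PySem.Int.mod bell P < L then solveLoop L P T D f (bell + D) else bell
    else bell

def solve (N : Int) (L : Int) (D : Int) : Int :=
  let T := N*L + (N-1)*5
  let bell := solveLoop L (L+5) T D (T+1).toNat 0
  if bell ≤ T then bell else T + D - PySem.Int.mod T D

-- ===== PORT B =====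
-- B's for-loop 'for i in range(1, N+1)' over the break windows, early return rendered as
-- Option; the loop counter i is carried explicitly, the Nat argument counts the remaining
-- iterations (N.toNat at the initial call i = 1, exactly range(1, N+1))
def altScan (P D T : Int) : Nat → Int → Option Int
  | 0, _ => none
  | n+1, i =>
    let start := i * P - 5
    let cand := PySem.Int.floordiv (start + D - 1) D * D
    if cand < start + 5 ∧ cand ≤ T then some cand else altScan P D T n (i+1)

def solve_alt (N : Int) (L : Int) (D : Int) : Int :=
  let T := N*L + (N-1)*5
  let P := L + 5
  match altScan P D T N.toNat 1 with
  | some c => c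
  | none => T + D - PySem.Int.mod T D

-- ===== PRECONDITION & SPEC =====
-- Pre_ admits the problem's natural domain 1 ≤ L, 1 ≤ D (N unrestricted) plus the
-- degenerate region N ≤ 0 with negative album length and D ≠ 0 (the loop never runs) and
-- the region -4 ≤ L ≤ 0, -L < D, nonnegative album length, where both programs return 0;
-- outside it A diverges (e.g. D = 0 with L ≥ 1), raises ZeroDivisionError (L = -5 with
-- nonnegative album length, or D = 0 at the fallback), or returns values produced by
-- negative-divisor modulo accidents of its implementation on a problem whose quantities
-- are positive.
def Pre_solve (N : Int) (L : Int) (D : Int) : Prop :=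
  (1 ≤ L ∧ 1 ≤ D) ∨ (N ≤ 0 ∧ D ≠ 0 ∧ N*L + (N-1)*5 < 0) ∨
    (-4 ≤ L ∧ L ≤ 0 ∧ 0 < L + D ∧ 0 ≤ N*L + (N-1)*5)
instance (N : Int) (L : Int) (D : Int) : Decidable (Pre_solve N L D) := by unfold Pre_solve; infer_instance
def pvWitness_solve : Int × Int × Int := (3, 4, 2)

def Spec_solve (N : Int) (L : Int) (D : Int) (out : Int) : Prop := out = solve_alt N L D
instance (N : Int) (L : Int) (D : Int) (out : Int) : Decidable (Spec_solve N L D out) := by unfold Spec_solve; infer_instance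

-- ===== CLAIM (what is proved, stated in full; the proofs are below) =====
def Claim_equal_solve : Prop := ∀ (N : Int) (L : Int) (D : Int), Dom_solve N L D → Pre_solve N L D → Spec_solve N L D (solve N L D)

-- ===== LEMMAS AND PROOFS =====

-- the bell times A could legitimately return: nonnegative multiples of D, within the
-- album, falling inside a break (m % (L+5) ≥ L)
def Good (L D T m : Int) : Prop := 0 ≤ m ∧ D ∣ m ∧ m ≤ T ∧ L ≤ m % (L+5)

theorem ceil_spec (D s : Int) (hD : 0 < D) :
    s ≤ (s + D - 1) / D * D ∧ (s + D - 1) / D * D ≤ s + D - 1 ∧ D ∣ (s + D - 1) / D * D ∧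
      ∀ m, D ∣ m → s ≤ m → (s + D - 1) / D * D ≤ m := by
  have hqr : D * ((s + D - 1) / D) + (s + D - 1) % D = s + D - 1 := Int.mul_ediv_add_emod _ _
  have hr0 : 0 ≤ (s + D - 1) % D := Int.emod_nonneg _ (by omega)
  have hr1 : (s + D - 1) % D < D := Int.emod_lt_of_pos _ hD
  have hc : (s + D - 1) / D * D = s + D - 1 - (s + D - 1) % D := by
    have := hqr; nlinarith [hqr]
  refine ⟨by omega, by omega, ⟨(s + D - 1) / D, by ring⟩, ?_⟩
  rintro m ⟨k, rfl⟩ hm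
  rcases le_or_gt ((s + D - 1) / D) k with h | h
  · calc (s + D - 1) / D * D ≤ k * D := by
          exact mul_le_mul_of_nonneg_right h (le_of_lt hD)
       _ = D * k := by ring
  · exfalso
    have hk : k ≤ (s + D - 1) / D - 1 := by omega
    have : D * k ≤ D * ((s + D - 1) / D - 1) := by
      exact mul_le_mul_of_nonneg_left hk (le_of_lt hD)
    nlinarith

theorem loop_stop (L P T D bell : Int) (f : Nat)
    (h : ¬ (bell ≤ T ∧ PySem.Int.mod bell P < L)) : solveLoop L P T D f bell = bell := by
  cases f with
  | zero => rfl
  | succ f =>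
    simp only [solveLoop]
    split_ifs with h1 h2
    · exact absurd ⟨h1, h2⟩ h
    · rfl
    · rfl

theorem loop_run (L P T D : Int) : ∀ (j : Nat) (f : Nat) (bell : Int), j ≤ f →
    (∀ i : Nat, i < j → ((bell + i*D ≤ T ∧ PySem.Int.mod (bell + i*D) P < L))) →
    ¬ (bell + j*D ≤ T ∧ PySem.Int.mod (bell + j*D) P < L) →
    solveLoop L P T D f bell = bell + j*D := by
  intro j
  induction j with
  | zero =>
    intro f bell _ _ hstop
    simpa using loop_stop L P T D bell f (by simpa using hstop)
  | succ j ih =>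
    intro f bell hjf hcont hstop
    obtain ⟨f, rfl⟩ : ∃ f', f = f' + 1 := ⟨f - 1, by omega⟩
    have h0 := hcont 0 (by omega)
    simp only [Nat.cast_zero, zero_mul, add_zero] at h0
    simp only [solveLoop, if_pos h0.1, if_pos h0.2]
    have hc' : ∀ i : Nat, i < j → ((bell + D) + i*D ≤ T ∧ PySem.Int.mod ((bell + D) + i*D) P < L) := by
      intro i hi
      have h := hcont (i+1) (by omega)
      have e : bell + ((i:Nat)+1 : Nat)*D = (bell + D) + (i:Int)*D := by push_cast; ring
      rwa [e] at h
    have hs' : ¬ ((bell + D) + j*D ≤ T ∧ PySem.Int.mod ((bell + D) + j*D) P < L) := by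
      have e : bell + ((j:Nat)+1 : Nat)*D = (bell + D) + (j:Int)*D := by push_cast; ring
      rwa [e] at hstop
    rw [ih f (bell+D) (by omega) hc' hs']
    push_cast; ring

theorem loopA (L T D : Int) (hD : 1 ≤ D) :
    ∃ j : Nat, solveLoop L (L+5) T D (T+1).toNat 0 = (j : Int) * D ∧
      ¬ ((j : Int)*D ≤ T ∧ PySem.Int.mod ((j : Int)*D) (L+5) < L) ∧
      ∀ i : Nat, i < j → ((i : Int)*D ≤ T ∧ PySem.Int.mod ((i : Int)*D) (L+5) < L) := by
  classical
  have hwit : ¬ ((((T+1).toNat : Int))*D ≤ T ∧ PySem.Int.mod ((((T+1).toNat : Int))*D) (L+5) < L) := by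
    rintro ⟨h1, -⟩
    rcases le_or_gt (T+1) 0 with h | h
    · rw [Int.toNat_of_nonpos h] at h1; simp at h1; omega
    · rw [Int.toNat_of_nonneg (by omega)] at h1; nlinarith
  have hex : ∃ k : Nat, ¬ ((k : Int)*D ≤ T ∧ PySem.Int.mod ((k : Int)*D) (L+5) < L) := ⟨_, hwit⟩
  refine ⟨Nat.find hex, ?_, Nat.find_spec hex, fun i hi => not_not.mp (Nat.find_min hex hi)⟩
  have := loop_run L (L+5) T D (Nat.find hex) (T+1).toNat 0 (Nat.find_min' hex hwit)
    (fun i hi => by simpa using not_not.mp (Nat.find_min hex hi))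
    (by simpa using Nat.find_spec hex)
  simpa using this

theorem scan_spec (N L D T : Int) (hL : 1 ≤ L) (hD : 1 ≤ D) (hT : T = N*(L+5) - 5) :
    ∀ (n : Nat) (i : Int), (N + 1 - i).toNat = n → 1 ≤ i → i ≤ N + 1 →
    (∀ m : Int, Good L D T m → i * (L+5) - 5 ≤ m) →
    ((∀ c, altScan (L+5) D T n i = some c →
        Good L D T c ∧ ∀ m, Good L D T m → c ≤ m)
     ∧ (altScan (L+5) D T n i = none → ∀ m, ¬ Good L D T m)) := by
  intro n
  induction n with
  | zero =>
    intro i h0 h1 h2 hprev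
    have hi : i = N + 1 := by omega
    subst hi
    constructor
    · intro c hc; simp [altScan] at hc
    · intro _ m hm
      have ha := hprev m hm
      have hb := hm.2.2.1
      have e : (N+1)*(L+5) = N*(L+5) + (L+5) := by ring
      linarith
  | succ n ih =>
    intro i h0 h1 h2 hprev
    have hiN : i < N + 1 := by omega
    have hdv : PySem.Int.floordiv (i * (L+5) - 5 + D - 1) D = (i * (L+5) - 5 + D - 1) / D :=
      PySem.Int.floordiv_eq_ediv_of_pos (by omega)
    obtain ⟨hc1, hc2, hc3, hc4⟩ := ceil_spec D (i * (L+5) - 5) (by omega)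
    have hsL : L ≤ i * (L+5) - 5 := by
      have : 1*(L+5) ≤ i*(L+5) := mul_le_mul_of_nonneg_right h1 (by omega)
      linarith
    by_cases h : (i * (L+5) - 5 + D - 1) / D * D < i * (L+5) - 5 + 5 ∧ (i * (L+5) - 5 + D - 1) / D * D ≤ T
    · have hres : altScan (L+5) D T (n+1) i
          = some ((i * (L+5) - 5 + D - 1) / D * D) := by
        simp only [altScan, hdv]
        rw [if_pos h]
      constructor
      · intro c hc
        rw [hres] at hc
        obtain rfl := Option.some.inj hc
        refine ⟨⟨by linarith, hc3, h.2, ?_⟩, fun m hm => hc4 m hm.2.1 (hprev m hm)⟩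
        -- L ≤ c % (L+5), with c ∈ [i*(L+5)-5, i*(L+5))
        have e2 : (L+5)*(i-1) = i*(L+5) - (L+5) := by ring
        have hu1 : L ≤ (i * (L+5) - 5 + D - 1) / D * D - (L+5)*(i-1) := by linarith
        have hu2 : (i * (L+5) - 5 + D - 1) / D * D - (L+5)*(i-1) < L+5 := by linarith
        have e4 : (i * (L+5) - 5 + D - 1) / D * D
            = ((i * (L+5) - 5 + D - 1) / D * D - (L+5)*(i-1)) + (L+5)*(i-1) := by ring
        have hmod := congrArg (· % (L+5)) e4
        simp only at hmod
        rw [Int.add_mul_emod_self_left] at hmod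
        rw [Int.emod_eq_of_lt (by linarith) (by linarith : (i * (L + 5) - 5 + D - 1) / D * D - (L+5)*(i-1) < L + 5)] at hmod
        linarith [hmod.ge, hmod.le]
      · intro hnone; rw [hres] at hnone; simp at hnone
    · have hres : altScan (L+5) D T (n+1) i
          = altScan (L+5) D T n (i+1) := by
        simp only [altScan, hdv]
        rw [if_neg h]
      rw [hres]
      apply ih (i+1) (by omega) (by omega) (by omega)
      intro m hm
      have hsm : i * (L+5) - 5 ≤ m := hprev m hm
      by_contra hlt
      push Not at hlt
      have e3 : (i+1)*(L+5) = i*(L+5) + (L+5) := by ring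
      by_cases hu : m < i * (L+5) - 5 + 5
      · have hcm : (i * (L+5) - 5 + D - 1) / D * D ≤ m := hc4 m hm.2.1 hsm
        exact h ⟨by linarith, le_trans hcm hm.2.2.1⟩
      · push Not at hu
        have hv1 : 0 ≤ m - i*(L+5) := by linarith
        have hv2 : m - i*(L+5) < L := by linarith
        have e4 : m = (m - i*(L+5)) + (L+5)*i := by ring
        have hmod := congrArg (· % (L+5)) e4
        simp only at hmod
        rw [Int.add_mul_emod_self_left] at hmod
        rw [Int.emod_eq_of_lt hv1 (by linarith : m - i*(L+5) < L + 5)] at hmod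
        have := hm.2.2.2
        linarith [hmod.le]

theorem solve_eq_alt (N L D : Int) (hL : 1 ≤ L) (hD : 1 ≤ D) : solve N L D = solve_alt N L D := by
  simp only [solve, solve_alt]
  set T := N*L + (N-1)*5 with hTdef
  have hT : T = N*(L+5) - 5 := by rw [hTdef]; ring
  obtain ⟨j, hjeq, hjstop, hjmin⟩ := loopA L T D hD
  have hmodP : ∀ t : Int, PySem.Int.mod t (L+5) = t % (L+5) := fun t =>
    PySem.Int.mod_eq_emod_of_pos (by omega)
  have hbase : ∀ m : Int, Good L D T m → 1 * (L+5) - 5 ≤ m := by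
    intro m hm
    by_contra hlt
    push Not at hlt
    have he : m % (L+5) = m := Int.emod_eq_of_lt hm.1 (by linarith)
    have := hm.2.2.2
    linarith [he.le]
  rw [hjeq]
  rcases hcase : altScan (L+5) D T N.toNat 1 with _ | c
  · have hng : ∀ m, ¬ Good L D T m := by
      rcases le_or_gt 0 N with h0N | h0N
      · exact (scan_spec N L D T hL hD hT N.toNat 1 (by omega) (le_refl 1) (by omega) hbase).2 hcase
      · intro m hm
        have hTneg : T < 0 := by nlinarith
        linarith [hm.1, hm.2.2.1]
    have hnot : ¬ ((j:Int)*D ≤ T) := by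
      intro hle
      apply hng ((j:Int)*D)
      refine ⟨mul_nonneg (Int.natCast_nonneg j) (by omega), ⟨j, by ring⟩, hle, ?_⟩
      have hnb : ¬ PySem.Int.mod ((j:Int)*D) (L+5) < L := fun hb => hjstop ⟨hle, hb⟩
      rw [hmodP] at hnb
      omega
    rw [if_neg hnot]
  · have h0N : 0 ≤ N := by
      by_contra h0N
      push Not at h0N
      rw [show N.toNat = 0 by omega] at hcase
      simp [altScan] at hcase
    obtain ⟨hGc, hmin⟩ :=
      (scan_spec N L D T hL hD hT N.toNat 1 (by omega) (le_refl 1) (by omega) hbase).1 c hcase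
    obtain ⟨q, hq⟩ := hGc.2.1
    have hq0 : 0 ≤ q := by nlinarith [hGc.1]
    have hkc : ((q.toNat : Int)) * D = c := by rw [Int.toNat_of_nonneg hq0, hq]; ring
    have hstopk : ¬ ((q.toNat:Int)*D ≤ T ∧ PySem.Int.mod ((q.toNat:Int)*D) (L+5) < L) := by
      rw [hkc]
      rintro ⟨-, hlt⟩
      rw [hmodP] at hlt
      linarith [hGc.2.2.2]
    have hjk : j ≤ q.toNat := by
      by_contra hgt
      push Not at hgt
      exact hstopk (hjmin q.toNat hgt)
    have hrc : (j:Int)*D ≤ c := by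
      rw [← hkc]
      exact mul_le_mul_of_nonneg_right (by exact_mod_cast hjk) (by omega)
    have hrT : (j:Int)*D ≤ T := le_trans hrc hGc.2.2.1
    have hrmod : L ≤ ((j:Int)*D) % (L+5) := by
      have hnb : ¬ PySem.Int.mod ((j:Int)*D) (L+5) < L := fun hb => hjstop ⟨hrT, hb⟩
      rw [hmodP] at hnb
      omega
    have hcr := hmin _ ⟨mul_nonneg (Int.natCast_nonneg j) (by omega), ⟨j, by ring⟩, hrT, hrmod⟩
    rw [if_pos hrT]
    show (j:Int)*D = c
    omega

-- the degenerate region of Pre_: the loop never runs and both programs fall through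
theorem solve_trivial (N L D : Int) (hN : N ≤ 0) (hT : N*L + (N-1)*5 < 0) :
    solve N L D = solve_alt N L D := by
  have h1 : (N*L + (N-1)*5 + 1).toNat = 0 := Int.toNat_of_nonpos (by linarith)
  have h2 : N.toNat = 0 := Int.toNat_of_nonpos hN
  simp only [solve, solve_alt, h1, h2, solveLoop, altScan]
  rw [if_neg (by linarith : ¬ ((0:Int) ≤ N*L + (N-1)*5))]

-- the small-nonpositive-L region of Pre_: the bell at time 0 is already outside a song,
-- A returns 0 at once, and B's first window yields candidate 0
theorem solve_zero (N L D : Int) (hL1 : -4 ≤ L) (hL0 : L ≤ 0) (hLD : 0 < L + D)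
    (hT : 0 ≤ N*L + (N-1)*5) : solve N L D = solve_alt N L D := by
  have hN : 1 ≤ N := by nlinarith
  have hloop : solveLoop L (L+5) (N*L + (N-1)*5) D (N*L + (N-1)*5 + 1).toNat 0 = 0 := by
    apply loop_stop
    rintro ⟨-, hlt⟩
    rw [PySem.Int.mod_eq_emod_of_pos (by omega), Int.zero_emod] at hlt
    omega
  have hdv : PySem.Int.floordiv (1 * (L+5) - 5 + D - 1) D = 0 := by
    rw [PySem.Int.floordiv_eq_ediv_of_pos (by omega)]
    exact Int.ediv_eq_zero_of_lt (by omega) (by omega)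
  have hNt : N.toNat = (N - 1).toNat + 1 := by omega
  simp only [solve, solve_alt, hloop, hNt, altScan, hdv]
  rw [if_pos hT, if_pos (by constructor <;> omega)]
  show (0:Int) = 0 * D
  ring

-- ===== VERDICT (by name: the statement is the Claim_ definition above) =====
theorem solve_spec : Claim_equal_solve := by
  intro N L D _ hPre
  rcases hPre with ⟨hL, hD⟩ | ⟨hN, _, hT⟩ | ⟨hL1, hL0, hLD, hT⟩
  · exact solve_eq_alt N L D hL hD
  · exact solve_trivial N L D hN hT
  · exact solve_zero N L D hL1 hL0 hLD hT
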